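-- pv_equiv track=rewrite | github.com/biofe/coevo_pipeline | coevo/sequences/motif_detection.py | _match_fragment_at
-- ===== SOURCE A (Python) =====
-- def _ungapped_to_aligned_index(sequence: str, ungapped_idx: int) -> int | None:
--     """Return the aligned index for the n-th (0-based) non-gap character.
--
--     Iterates through *sequence* counting non-``'-'`` characters.  When the
--     *ungapped_idx*-th non-gap character is reached its position in the aligned
--     string is returned.  Returns ``None`` if *ungapped_idx* is beyond the last
--     non-gap character.
--
--     Example::
--
--         sequence    = "A-CG"
--         ungapped[0] = 'A'  -> aligned index 0
--         ungapped[1] = 'C'  -> aligned index 2   (gap at index 1 is skipped)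
--         ungapped[2] = 'G'  -> aligned index 3
--
--     Parameters
--     ----------
--     sequence:
--         Aligned sequence string, potentially containing ``-`` gap characters.
--     ungapped_idx:
--         Zero-based index in the ungapped (gap-stripped) sequence.
--
--     Returns
--     -------
--     int or None
--         Position in the aligned sequence, or ``None`` if *ungapped_idx* is
--         beyond the last non-gap character.
--     """
--     count = 0
--     for i, ch in enumerate(sequence):
--         if ch != "-":
--             if count == ungapped_idx:
--                 return i
--             count += 1
--     return None
--
-- def _match_fragment_at(
--     sequence: str,
--     ungapped_start: int,
--     char_sets: list[frozenset[str]],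
-- ) -> bool:
--     """Return ``True`` if *char_sets* matches *sequence* starting at *ungapped_start*.
--
--     Each element of *char_sets* is checked against consecutive non-gap
--     residues beginning at the *ungapped_start*-th non-gap character (0-based).
--
--     Parameters
--     ----------
--     sequence:
--         Aligned sequence string (may contain ``-`` gap characters).
--     ungapped_start:
--         Zero-based starting index in the ungapped sequence.
--     char_sets:
--         Per-position sets of accepted characters (from :func:`_parse_fragment`).
--
--     Returns
--     -------
--     bool
--     """
--     for offset, char_set in enumerate(char_sets):
--         aligned_idx = _ungapped_to_aligned_index(sequence, ungapped_start + offset)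
--         if aligned_idx is None or sequence[aligned_idx].lower() not in char_set:
--             return False
--     return True
-- ===== SOURCE B (Python) =====
-- def _match_fragment_at(sequence, ungapped_start, char_sets):
--     """Single forward pass: skip ungapped_start non-gap chars, then check
--     each char_set against consecutive non-gap residues."""
--     if ungapped_start < 0:
--         # no non-gap character has a negative ungapped index
--         return not char_sets
--     if not char_sets:
--         return True
--     skip = ungapped_start        # non-gap characters still to skip
--     remaining = list(char_sets)  # sets still to match
--     for ch in sequence:
--         if ch == "-":
--             continue
--         if skip > 0:
--             skip -= 1
--             continue
--         if ch.lower() not in remaining[0]: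
--             return False
--         remaining.pop(0)
--         if not remaining:
--             return True
--     return False
-- ===== Notes on version B (the rewrite author's own statement) =====
-- stated objective: faster
-- what changed: A rescans the sequence from the start for every position in char_sets (quadratic); B makes one forward pass over the sequence, skipping ungapped_start non-gap chars and then checking the char_sets incrementally.
import Mathlib
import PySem

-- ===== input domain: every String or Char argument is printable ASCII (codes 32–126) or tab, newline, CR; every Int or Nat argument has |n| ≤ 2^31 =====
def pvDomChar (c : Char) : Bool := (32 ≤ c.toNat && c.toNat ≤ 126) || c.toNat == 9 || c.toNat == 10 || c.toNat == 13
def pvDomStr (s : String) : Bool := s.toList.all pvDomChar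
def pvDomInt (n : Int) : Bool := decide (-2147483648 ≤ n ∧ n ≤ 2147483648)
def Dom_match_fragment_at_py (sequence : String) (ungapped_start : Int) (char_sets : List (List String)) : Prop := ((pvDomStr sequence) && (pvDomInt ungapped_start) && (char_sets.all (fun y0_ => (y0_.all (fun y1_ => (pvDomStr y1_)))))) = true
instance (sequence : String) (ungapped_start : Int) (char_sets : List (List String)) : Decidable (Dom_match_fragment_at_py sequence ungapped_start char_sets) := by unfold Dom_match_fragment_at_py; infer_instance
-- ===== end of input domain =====

-- B replaces A's per-position rescan of the sequence (O(m*n)) by one forward pass (O(n+m)); objective: faster.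

-- ===== PORT A =====

-- ch.lower() for a one-character string slice (sequence[i].lower())
def pvLower1 (c : Char) : String := PySem.Str.lower (String.ofList [c])

-- loop of _ungapped_to_aligned_index: i = aligned position, count = non-gap chars seen
def pvUgaGo : List Char → Int → Int → Int → Option Int
  | [], _, _, _ => none
  | ch :: rest, i, count, k =>
    if ch ≠ '-' then
      if count == k then some i else pvUgaGo rest (i + 1) (count + 1) k
    else pvUgaGo rest (i + 1) count k

def ungapped_to_aligned_index_py (sequence : String) (ungapped_idx : Int) : Option Int :=
  pvUgaGo sequence.toList 0 0 ungapped_idx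

-- loop of _match_fragment_at over enumerate(char_sets)
def pvAGo (sequence : String) (ungapped_start : Int) : Int → List (List String) → Bool
  | _, [] => true
  | offset, char_set :: rest =>
    match ungapped_to_aligned_index_py sequence (ungapped_start + offset) with
    | none => false
    | some aligned_idx =>
      match PySem.Str.pyGet? sequence aligned_idx with
      | none => false  -- unreachable: the helper returns a valid index
      | some c => if (pvLower1 c) ∈ char_set then pvAGo sequence ungapped_start (offset + 1) rest else false

def match_fragment_at_py (sequence : String) (ungapped_start : Int) (char_sets : List (List String)) : Bool :=
  pvAGo sequence ungapped_start 0 char_sets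

-- ===== PORT B =====

-- single forward pass: skip `skip` non-gap chars, then match the remaining sets one by one
def pvBGo : List Char → Int → List (List String) → Bool
  | [], _, _ => false
  | ch :: rest, skip, remaining =>
    if ch == '-' then pvBGo rest skip remaining
    else if skip > 0 then pvBGo rest (skip - 1) remaining
    else
      match remaining with
      | [] => false  -- unreachable: the wrapper never passes an empty list
      | cs :: restSets =>
        if (pvLower1 ch) ∈ cs then
          if restSets.isEmpty then true else pvBGo rest skip restSets
        else false

def match_fragment_at_py_alt (sequence : String) (ungapped_start : Int) (char_sets : List (List String)) : Bool :=
  if ungapped_start < 0 then char_sets.isEmpty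
  else if char_sets.isEmpty then true
  else pvBGo sequence.toList ungapped_start char_sets

-- ===== PRECONDITION & SPEC =====
def Spec_match_fragment_at_py (sequence : String) (ungapped_start : Int) (char_sets : List (List String)) (out : Bool) : Prop := out = match_fragment_at_py_alt sequence ungapped_start char_sets
instance (sequence : String) (ungapped_start : Int) (char_sets : List (List String)) (out : Bool) : Decidable (Spec_match_fragment_at_py sequence ungapped_start char_sets out) := by unfold Spec_match_fragment_at_py; infer_instance

-- ===== CLAIM (what is proved, stated in full; the proofs are below) =====
def Claim_equal_match_fragment_at_py : Prop := ∀ (sequence : String) (ungapped_start : Int) (char_sets : List (List String)), Dom_match_fragment_at_py sequence ungapped_start char_sets → Spec_match_fragment_at_py sequence ungapped_start char_sets (match_fragment_at_py sequence ungapped_start char_sets)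

-- ===== LEMMAS AND PROOFS =====

-- the non-gap residues of a char list
def pvNG (l : List Char) : List Char := l.filter (fun c => c ≠ '-')

-- common specification: match the sets against consecutive chars
def pvML : List Char → List (List String) → Bool
  | _, [] => true
  | [], _ :: _ => false
  | c :: cs, s :: ss => if (pvLower1 c) ∈ s then pvML cs ss else false

-- A's helper, composed with the indexing it is used for, fetches the k-th non-gap char
lemma pvUga_fetch : ∀ (l pre : List Char) (count k : Int), 0 ≤ count →
    (pvUgaGo l (pre.length : Int) count k).bind (fun idx => PySem.List.pyGet? (pre ++ l) idx)
    = (if k < count then none else (pvNG l)[(k - count).toNat]?) := by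
  intro l
  induction l with
  | nil =>
    intro pre count k _
    simp [pvUgaGo, pvNG]
  | cons ch rest ih =>
    intro pre count k hc
    by_cases hg : ch = '-'
    · subst hg
      have h := ih (pre ++ ['-']) count k hc
      simp only [List.length_append, List.length_cons, List.length_nil] at h
      push_cast at h
      simpa [pvUgaGo, pvNG, List.append_assoc] using h
    · by_cases he : count = k
      · subst he
        have hL : pvUgaGo (ch :: rest) (pre.length : Int) count count = some (pre.length : Int) := by
          simp [pvUgaGo, hg]
        rw [hL, Option.bind_some, PySem.List.pyGet?_append_length pre rest ch]
        simp [pvNG, hg, show ¬ count < count by omega, show (count - count).toNat = 0 by omega]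
      · have h := ih (pre ++ [ch]) (count + 1) k (by omega)
        simp only [List.length_append, List.length_cons, List.length_nil] at h
        push_cast at h
        rw [List.append_assoc] at h
        simp only [List.singleton_append] at h
        have hL : pvUgaGo (ch :: rest) (pre.length : Int) count k
            = pvUgaGo rest ((pre.length : Int) + 1) (count + 1) k := by
          simp [pvUgaGo, hg, he]
        rw [hL, h]
        have hngc : pvNG (ch :: rest) = ch :: pvNG rest := by simp [pvNG, hg]
        rw [hngc]
        by_cases hlt : k < count
        · simp [show k < count + 1 by omega, hlt]
        · by_cases hlt2 : k < count + 1
          · omega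
          · simp only [if_neg hlt, if_neg hlt2]
            rw [show (k - count).toNat = (k - (count + 1)).toNat + 1 by omega]
            simp

-- A's loop equals pvML on the dropped non-gap list
lemma pvAGo_spec (sequence : String) (start : Int) :
    ∀ (css : List (List String)) (offset : Int),
      pvAGo sequence start offset css
      = (if start + offset < 0 then css.isEmpty
         else pvML ((pvNG sequence.toList).drop (start + offset).toNat) css) := by
  intro css
  induction css with
  | nil =>
    intro offset
    by_cases h : start + offset < 0 <;> simp [pvAGo, pvML, h]
  | cons cs rest ih =>
    intro offset
    have hfetch := pvUga_fetch sequence.toList [] 0 (start + offset) le_rfl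
    simp only [List.length_nil, Int.natCast_zero, List.nil_append, Int.sub_zero] at hfetch
    by_cases hneg : start + offset < 0
    · rw [if_pos hneg]
      rw [if_pos hneg] at hfetch
      cases hug : pvUgaGo sequence.toList 0 0 (start + offset) with
      | none => simp [pvAGo, ungapped_to_aligned_index_py, hug]
      | some idx =>
        rw [hug, Option.bind_some] at hfetch
        simp [pvAGo, ungapped_to_aligned_index_py, hug, PySem.Str.pyGet?_eq, hfetch]
    · rw [if_neg hneg]
      rw [if_neg hneg] at hfetch
      cases hdrop : ((pvNG sequence.toList)[(start + offset).toNat]? : Option Char) with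
      | none =>
        have hlen : (pvNG sequence.toList).length ≤ (start + offset).toNat :=
          List.getElem?_eq_none_iff.mp hdrop
        rw [hdrop] at hfetch
        have hdropnil : (pvNG sequence.toList).drop (start + offset).toNat = [] :=
          List.drop_eq_nil_of_le hlen
        rw [hdropnil]
        cases hug : pvUgaGo sequence.toList 0 0 (start + offset) with
        | none => simp [pvAGo, ungapped_to_aligned_index_py, hug, pvML]
        | some idx =>
          rw [hug, Option.bind_some] at hfetch
          simp [pvAGo, ungapped_to_aligned_index_py, hug, PySem.Str.pyGet?_eq, hfetch, pvML]
      | some c =>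
        have hlt : (start + offset).toNat < (pvNG sequence.toList).length := by
          by_contra hcon
          push_neg at hcon
          rw [List.getElem?_eq_none_iff.mpr hcon] at hdrop
          exact absurd hdrop (by simp)
        rw [hdrop] at hfetch
        have hdropcons : (pvNG sequence.toList).drop (start + offset).toNat
            = c :: (pvNG sequence.toList).drop ((start + offset).toNat + 1) := by
          rw [List.drop_eq_getElem_cons hlt]
          congr 1
          have h2 := List.getElem?_eq_getElem hlt
          rw [hdrop] at h2
          exact (Option.some.injEq _ _ ▸ h2).symm
        rw [hdropcons]
        cases hug : pvUgaGo sequence.toList 0 0 (start + offset) with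
        | none => rw [hug, Option.bind_none] at hfetch; exact absurd hfetch.symm (by simp)
        | some idx =>
          rw [hug, Option.bind_some] at hfetch
          simp only [pvAGo, ungapped_to_aligned_index_py, hug, PySem.Str.pyGet?_eq]
          rw [PySem.Chars.pyGet?_eq_listPyGet?, hfetch]
          simp only [pvML]
          by_cases hmem : (pvLower1 c) ∈ cs
          · rw [if_pos hmem, if_pos hmem, ih (offset + 1),
                if_neg (show ¬ start + (offset + 1) < 0 by omega)]
            congr 2
            omega
          · simp [hmem]

-- B's loop equals pvML on the dropped non-gap list (nonempty sets, nonnegative skip)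
lemma pvBGo_spec : ∀ (l : List Char) (skip : Int) (css : List (List String)),
    0 ≤ skip → css ≠ [] →
    pvBGo l skip css = pvML ((pvNG l).drop skip.toNat) css := by
  intro l
  induction l with
  | nil =>
    intro skip css _ hcs
    cases css with
    | nil => exact absurd rfl hcs
    | cons cs rest => simp [pvBGo, pvNG, pvML]
  | cons ch restL ih =>
    intro skip css hsk hcs
    by_cases hg : ch = '-'
    · subst hg
      rw [show pvBGo ('-' :: restL) skip css = pvBGo restL skip css by simp [pvBGo]]
      rw [ih skip css hsk hcs]
      have : pvNG ('-' :: restL) = pvNG restL := by simp [pvNG]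
      rw [this]
    · by_cases hpos : skip > 0
      · rw [show pvBGo (ch :: restL) skip css = pvBGo restL (skip - 1) css by
            simp [pvBGo, hg, hpos]]
        rw [ih (skip - 1) css (by omega) hcs]
        have hngc : pvNG (ch :: restL) = ch :: pvNG restL := by simp [pvNG, hg]
        rw [hngc, show skip.toNat = (skip - 1).toNat + 1 by omega]
        simp
      · have hz : skip = 0 := by omega
        subst hz
        cases css with
        | nil => exact absurd rfl hcs
        | cons cs restSets =>
          have hngc : pvNG (ch :: restL) = ch :: pvNG restL := by simp [pvNG, hg]
          rw [hngc]
          simp only [Int.toNat_zero, List.drop_zero, pvML]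
          rw [show pvBGo (ch :: restL) 0 (cs :: restSets)
                = (if (pvLower1 ch) ∈ cs then
                     (if restSets.isEmpty then true else pvBGo restL 0 restSets)
                   else false) by simp [pvBGo, hg]]
          by_cases hmem : (pvLower1 ch) ∈ cs
          · rw [if_pos hmem, if_pos hmem]
            cases restSets with
            | nil => simp [pvML]
            | cons s2 r2 =>
              rw [ih 0 (s2 :: r2) le_rfl (by simp)]
              simp
          · simp [hmem]

-- ===== VERDICT (by name: the statement is the Claim_ definition above) =====
theorem match_fragment_at_py_spec : Claim_equal_match_fragment_at_py := by
  intro sequence start css _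
  unfold Spec_match_fragment_at_py match_fragment_at_py match_fragment_at_py_alt
  rw [pvAGo_spec sequence start css 0]
  rw [Int.add_zero]
  by_cases hneg : start < 0
  · simp [hneg]
  · rw [if_neg hneg, if_neg hneg]
    cases css with
    | nil => simp [pvML]
    | cons cs rest =>
      rw [if_neg (by simp)]
      exact (pvBGo_spec sequence.toList start (cs :: rest) (by omega) (by simp)).symm
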